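-- pv_equiv track=rewrite | github.com/Guitarboyjason/Algorithm | 백준/Bronze/2033. 반올림/반올림.py | solve
-- ===== SOURCE A (Python) =====
-- def solve(N):
--     if N < 10:
--         return N
--     else:
--         if N%10 >= 5:
--             return(solve(N//10+1))
--         else:
--             return(solve(N//10))
-- ===== SOURCE B (Python) =====
-- def solve(N):
--     while N >= 10:
--         N, d = divmod(N, 10)
--         if d >= 5:
--             N += 1
--     return N
-- ===== Notes on version B (the rewrite author's own statement) =====
-- stated objective: idiomatic
-- what changed: Replaces the tail recursion by an iterative while-loop that keeps one running value N and uses divmod to split off the last digit each step.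
import Mathlib
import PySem

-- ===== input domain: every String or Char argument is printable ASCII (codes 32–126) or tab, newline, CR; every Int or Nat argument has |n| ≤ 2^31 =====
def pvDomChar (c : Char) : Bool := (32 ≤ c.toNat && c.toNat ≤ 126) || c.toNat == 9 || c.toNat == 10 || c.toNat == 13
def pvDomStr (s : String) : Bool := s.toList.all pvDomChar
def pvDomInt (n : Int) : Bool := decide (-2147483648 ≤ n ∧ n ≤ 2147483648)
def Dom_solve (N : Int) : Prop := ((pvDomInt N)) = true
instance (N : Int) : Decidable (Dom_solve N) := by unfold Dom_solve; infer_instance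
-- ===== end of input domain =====

-- B replaces A's tail recursion by an iterative while-loop over the running value N (idiomatic decomposition; same cost).


-- ===== PORT A =====
def solve (N : Int) : Int :=
  if N < 10 then N
  else
    if PySem.Int.mod N 10 ≥ 5 then solve (PySem.Int.floordiv N 10 + 1)
    else solve (PySem.Int.floordiv N 10)
termination_by N.toNat
decreasing_by
  all_goals
    rw [PySem.Int.floordiv_eq_ediv_of_pos (by omega : (0:Int) < 10)]
    omega

-- ===== PORT B =====
-- B's while-loop, with fuel that is provably enough (each iteration shrinks N by at least 1).
def solveLoop (fuel : Nat) (n : Int) : Int :=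
  match fuel with
  | 0 => n
  | f + 1 =>
    if n ≥ 10 then
      let q := PySem.Int.floordiv n 10
      let d := PySem.Int.mod n 10
      solveLoop f (if d ≥ 5 then q + 1 else q)
    else n

def solve_alt (N : Int) : Int := solveLoop N.toNat N

-- ===== PRECONDITION & SPEC =====
def Spec_solve (N : Int) (out : Int) : Prop := out = solve_alt N
instance (N : Int) (out : Int) : Decidable (Spec_solve N out) := by unfold Spec_solve; infer_instance

-- ===== CLAIM (what is proved, stated in full; the proofs are below) =====
def Claim_equal_solve : Prop := ∀ (N : Int), Dom_solve N → Spec_solve N (solve N)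

-- ===== LEMMAS AND PROOFS =====

theorem solveLoop_eq_solve : ∀ (fuel : Nat) (n : Int), n.toNat ≤ fuel → solveLoop fuel n = solve n := by
  intro fuel
  induction fuel with
  | zero =>
    intro n h
    rw [solve]
    simp only [solveLoop]
    rw [if_pos (by omega)]
  | succ f ih =>
    intro n h
    rw [solve]
    by_cases h10 : n < 10
    · simp only [solveLoop, if_neg (by omega : ¬ n ≥ 10), if_pos h10]
    · have hq : PySem.Int.floordiv n 10 = n / 10 :=
        PySem.Int.floordiv_eq_ediv_of_pos (by omega)
      simp only [solveLoop, if_pos (by omega : n ≥ 10), if_neg h10]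
      by_cases h5 : PySem.Int.mod n 10 ≥ 5
      · rw [if_pos h5, ih _ (by rw [hq]; omega), if_pos h5]
      · rw [if_neg h5, ih _ (by rw [hq]; omega), if_neg h5]

-- ===== VERDICT (by name: the statement is the Claim_ definition above) =====
theorem solve_spec : Claim_equal_solve := by
  intro N _
  unfold Spec_solve solve_alt
  exact (solveLoop_eq_solve N.toNat N le_rfl).symm
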